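-- pv_equiv track=rewrite | github.com/guardian/oz-2023-facebook-political-ads-scraper | voice-ads.py | mergeStates
-- ===== SOURCE A (Python) =====
-- state_template = [
-- 	{'percentage': '0', 'region': 'Australian Capital Territory'},
-- 	{'percentage': '0', 'region': 'New South Wales'},
-- 	{'percentage': '0', 'region': 'Northern Territory'},
-- 	{'percentage': '0', 'region': 'Queensland'},
-- 	{'percentage': '0', 'region': 'South Australia'},
-- 	{'percentage': '0', 'region': 'Tasmania'},
-- 	{'percentage': '0', 'region': 'Victoria'},
-- 	{'percentage': '0', 'region': 'Western Australia'}
-- 	]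
--
-- def mergeStates(state_list):
-- 	result = []
-- 	for row in state_template:
-- 		match = [d for d in state_list if d.get('region') == row['region']]
-- 		if match:
-- 			result.append(match[0])
-- 		else:
-- 			result.append(row)
-- 	return result
-- ===== SOURCE B (Python) =====
-- state_template = [
-- 	{'percentage': '0', 'region': 'Australian Capital Territory'},
-- 	{'percentage': '0', 'region': 'New South Wales'},
-- 	{'percentage': '0', 'region': 'Northern Territory'},
-- 	{'percentage': '0', 'region': 'Queensland'},
-- 	{'percentage': '0', 'region': 'South Australia'},
-- 	{'percentage': '0', 'region': 'Tasmania'},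
-- 	{'percentage': '0', 'region': 'Victoria'},
-- 	{'percentage': '0', 'region': 'Western Australia'}
-- 	]
--
-- def mergeStates(state_list):
-- 	seen = {}
-- 	for d in state_list:
-- 		key = d.get('region')
-- 		if key not in seen:
-- 			seen[key] = d
-- 	return [seen.get(row['region'], row) for row in state_template]
-- ===== Notes on version B (the rewrite author's own statement) =====
-- stated objective: idiomatic
-- what changed: B builds a first-occurrence index dict keyed by d.get('region') in one pass over state_list, then maps over the 8-row template with O(1) lookups, instead of A's fresh filter scan of state_list for every template row.
import Mathlib
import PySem

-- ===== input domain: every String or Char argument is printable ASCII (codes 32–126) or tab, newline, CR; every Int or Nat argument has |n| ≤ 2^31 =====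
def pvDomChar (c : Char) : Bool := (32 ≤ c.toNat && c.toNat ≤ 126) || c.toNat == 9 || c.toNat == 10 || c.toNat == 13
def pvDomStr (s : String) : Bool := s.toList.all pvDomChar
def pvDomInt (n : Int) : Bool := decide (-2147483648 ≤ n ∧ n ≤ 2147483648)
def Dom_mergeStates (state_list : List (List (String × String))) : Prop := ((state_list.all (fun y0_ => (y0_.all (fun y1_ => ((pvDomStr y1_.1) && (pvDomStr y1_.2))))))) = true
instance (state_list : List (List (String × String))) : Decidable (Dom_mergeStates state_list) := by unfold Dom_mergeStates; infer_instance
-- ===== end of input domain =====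

-- B replaces the per-template-row scan of state_list by one index-building pass
-- keeping the first dict per region, then a single template pass with O(1) lookups.

-- d.get('region'): first-match lookup in the association list (Python dict .get)
def agetRegion (d : List (String × String)) : Option String :=
  (d.find? (fun p => p.1 == "region")).map (·.2)

def stateTemplate : List (List (String × String)) :=
  [ [("percentage", "0"), ("region", "Australian Capital Territory")],
    [("percentage", "0"), ("region", "New South Wales")],
    [("percentage", "0"), ("region", "Northern Territory")],
    [("percentage", "0"), ("region", "Queensland")],
    [("percentage", "0"), ("region", "South Australia")],
    [("percentage", "0"), ("region", "Tasmania")],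
    [("percentage", "0"), ("region", "Victoria")],
    [("percentage", "0"), ("region", "Western Australia")] ]

-- ===== PORT A =====
-- row['region'] on a template row: every template row carries 'region', so the
-- raising subscript is ported as the (always-some) lookup with a dummy default.
def mergeStates (state_list : List (List (String × String))) : List (List (String × String)) :=
  stateTemplate.foldl (fun result row =>
    let mtch := state_list.filter (fun d => agetRegion d == some ((agetRegion row).getD ""))
    match mtch with
    | [] => result ++ [row]
    | m :: _ => result ++ [m]) []

-- ===== PORT B =====
def buildSeen (state_list : List (List (String × String))) :
    PySem.Dict (Option String) (List (String × String)) :=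
  state_list.foldl (fun seen d =>
    let key := agetRegion d
    if seen.contains key then seen else seen.insert key d) PySem.Dict.empty

def mergeStates_alt (state_list : List (List (String × String))) : List (List (String × String)) :=
  let seen := buildSeen state_list
  stateTemplate.map (fun row => seen.getD (some ((agetRegion row).getD "")) row)

-- ===== PRECONDITION & SPEC =====
def Spec_mergeStates (state_list : List (List (String × String))) (out : List (List (String × String))) : Prop := out = mergeStates_alt state_list
instance (state_list : List (List (String × String))) (out : List (List (String × String))) : Decidable (Spec_mergeStates state_list out) := by unfold Spec_mergeStates; infer_instance

-- ===== CLAIM (what is proved, stated in full; the proofs are below) =====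
def Claim_equal_mergeStates : Prop := ∀ (state_list : List (List (String × String))), Dom_mergeStates state_list → Spec_mergeStates state_list (mergeStates state_list)

-- ===== LEMMAS AND PROOFS =====

-- the index keeps the first dict per region: its lookup is the head of A's filter
lemma buildSeen_get (l : List (List (String × String)))
    (seen : PySem.Dict (Option String) (List (String × String))) (r : String) :
    (l.foldl (fun seen d =>
        let key := agetRegion d
        if seen.contains key then seen else seen.insert key d) seen).get? (some r)
      = ((seen.get? (some r)).orElse
          (fun _ => (l.filter (fun d => agetRegion d == some r)).head?)) := by
  induction l generalizing seen with
  | nil => cases h : seen.get? (some r) <;> simp [Option.orElse, h]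
  | cons d t ih =>
    simp only [List.foldl_cons, List.filter_cons]
    by_cases hk : agetRegion d = some r
    · simp only [hk, beq_self_eq_true, reduceIte]
      by_cases hc : seen.contains (some r) = true
      · rw [if_pos hc, ih]
        rcases hg : seen.get? (some r) with _ | v
        · exfalso
          have hcc := PySem.Dict.contains_eq_isSome_get? (d := seen) (k := some r)
          rw [hg] at hcc; simp [hcc] at hc
        · simp [Option.orElse]
      · rw [if_neg hc, ih, PySem.Dict.get?_insert_self]
        have h0 : seen.get? (some r) = none := by
          have hcc := PySem.Dict.contains_eq_isSome_get? (d := seen) (k := some r)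
          cases hg : seen.get? (some r)
          · rfl
          · rw [hg] at hcc; simp at hcc; exact absurd hcc hc
        simp [Option.orElse, h0]
    · have hb : (agetRegion d == some r) = false := by simp [hk]
      simp only [hb]
      by_cases hc : seen.contains (agetRegion d) = true
      · rw [if_pos hc, ih]; simp
      · rw [if_neg hc, ih,
          PySem.Dict.get?_insert_of_ne (hne := fun h => hk h.symm)]
        simp

lemma elem_eq (l : List (List (String × String))) (row : List (String × String)) (r : String) :
    (match l.filter (fun d => agetRegion d == some r) with
      | [] => row
      | m :: _ => m)
      = (buildSeen l).getD (some r) row := by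
  rw [PySem.Dict.getD_eq_get?_getD, buildSeen, buildSeen_get]
  cases h : l.filter (fun d => agetRegion d == some r) <;>
    simp [Option.orElse, PySem.Dict.get?_empty]

-- A's foldl-with-append over the template is a map over the template
lemma foldlA (l : List (List (String × String)))
    (tpl : List (List (String × String))) (acc : List (List (String × String))) :
    tpl.foldl (fun result row =>
      match l.filter (fun d => agetRegion d == some ((agetRegion row).getD "")) with
      | [] => result ++ [row]
      | m :: _ => result ++ [m]) acc
    = acc ++ tpl.map (fun row =>
      match l.filter (fun d => agetRegion d == some ((agetRegion row).getD "")) with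
      | [] => row
      | m :: _ => m) := by
  induction tpl generalizing acc with
  | nil => simp
  | cons r t ih =>
    simp only [List.foldl_cons, List.map_cons]
    rw [ih]
    cases h : l.filter (fun d => agetRegion d == some ((agetRegion r).getD "")) <;>
      simp

-- ===== VERDICT (by name: the statement is the Claim_ definition above) =====
theorem mergeStates_spec : Claim_equal_mergeStates := by
  intro l _
  show mergeStates l = mergeStates_alt l
  simp only [mergeStates, mergeStates_alt]
  rw [foldlA, List.nil_append]
  exact List.map_congr_left fun row _ => elem_eq l row ((agetRegion row).getD "")
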